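-- pv_equiv track=rewrite | github.com/rehan5039/Python_Learning | DSA/09_greedy_algorithms/practice_problems/problems.py | min_cost_connecting_points
-- ===== SOURCE A (Python) =====
-- from typing import List, Tuple
--
-- class UnionFind:
--     """Union-Find data structure for Kruskal's algorithm."""
--     def __init__(self, n: int):
--         self.parent = list(range(n))
--         self.rank = [0] * n
--
--     def find(self, x: int) -> int:
--         if self.parent[x] != x:
--             self.parent[x] = self.find(self.parent[x])
--         return self.parent[x]
--
--     def union(self, x: int, y: int) -> bool:
--         root_x = self.find(x)
--         root_y = self.find(y)
--         if root_x == root_y: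
--             return False
--         if self.rank[root_x] < self.rank[root_y]:
--             self.parent[root_x] = root_y
--         elif self.rank[root_x] > self.rank[root_y]:
--             self.parent[root_y] = root_x
--         else:
--             self.parent[root_y] = root_x
--             self.rank[root_x] += 1
--         return True
--
-- def kruskal_mst(vertices: int, edges: List[Tuple[int, int, int]]) -> Tuple[int, List[Tuple[int, int, int]]]:
--     """Problem 9: Kruskal's MST"""
--     edges.sort(key=lambda x: x[2])
--     uf = UnionFind(vertices)
--     mst_edges = []
--     total_weight = 0
--     for u, v, weight in edges:
--         if uf.union(u, v):
--             mst_edges.append((u, v, weight))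
--             total_weight += weight
--             if len(mst_edges) == vertices - 1:
--                 break
--     return total_weight, mst_edges
--
-- def min_cost_connecting_points(points: List[List[int]]) -> int:
--     """Problem 13: Minimum Cost Connecting Points"""
--     if len(points) <= 1:
--         return 0
--     n = len(points)
--     edges = []
--     for i in range(n):
--         for j in range(i + 1, n):
--             distance = abs(points[i][0] - points[j][0]) + abs(points[i][1] - points[j][1])
--             edges.append((i, j, distance))
--     weight, _ = kruskal_mst(n, edges)
--     return weight
-- ===== SOURCE B (Python) =====
-- def min_cost_connecting_points(points):
--     """Minimum Cost Connecting Points: Kruskal's greedy on the sorted edge list,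
--     tracking components with a flat label array merged by relabelling
--     (no Union-Find class, no recursion, no MST edge list)."""
--     n = len(points)
--     if n <= 1:
--         return 0
--     edges = [(i, j, abs(points[i][0] - points[j][0]) + abs(points[i][1] - points[j][1]))
--              for i in range(n) for j in range(i + 1, n)]
--     comp = list(range(n))
--     total = 0
--     merged = 0
--     for i, j, d in sorted(edges, key=lambda e: e[2]):
--         ci, cj = comp[i], comp[j]
--         if ci != cj:
--             comp = [ci if c == cj else c for c in comp]
--             total += d
--             merged += 1
--             if merged == n - 1:
--                 break
--     return total
-- ===== Notes on version B (the rewrite author's own statement) =====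
-- stated objective: simpler
-- what changed: B keeps Kruskal's greedy edge order but drops the whole UnionFind class (recursive path-compression find, union by rank) and the kruskal_mst helper that also builds an MST edge list: connectivity is tracked by a flat component-label array merged by a one-line relabel, in a single short function.
import Mathlib
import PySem

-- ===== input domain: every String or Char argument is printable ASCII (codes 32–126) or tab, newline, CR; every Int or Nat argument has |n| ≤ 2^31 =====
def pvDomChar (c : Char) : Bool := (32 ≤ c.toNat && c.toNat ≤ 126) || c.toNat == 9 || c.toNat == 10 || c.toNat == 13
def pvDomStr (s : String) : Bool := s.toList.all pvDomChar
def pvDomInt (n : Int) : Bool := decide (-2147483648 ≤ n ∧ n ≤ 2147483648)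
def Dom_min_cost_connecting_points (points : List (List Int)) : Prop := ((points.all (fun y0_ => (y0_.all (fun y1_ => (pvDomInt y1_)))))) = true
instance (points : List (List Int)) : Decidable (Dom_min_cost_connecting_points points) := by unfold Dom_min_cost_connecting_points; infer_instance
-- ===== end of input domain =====

-- B replaces A's UnionFind class (recursive path-compression find, union by rank) and the
-- kruskal_mst helper by a flat component-label array merged by relabelling: simpler, same cost.

-- shared helper: Python list indexing xs[i] (all indices used by either program are in range)
def pg (l : List Int) (i : Int) : Int := PySem.List.pyGetD l i 0

-- points[i][k]
def coord (points : List (List Int)) (i k : Int) : Int :=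
  PySem.List.pyGetD (PySem.List.pyGetD points i []) k 0

-- abs(points[i][0]-points[j][0]) + abs(points[i][1]-points[j][1])  (both Pythons compute this expression)
def manh (points : List (List Int)) (i j : Int) : Int :=
  |coord points i 0 - coord points j 0| + |coord points i 1 - coord points j 1|

-- ===== PORT A =====
-- UnionFind.find with path compression; fuel only makes the recursion total (unreachable 0-case)
def ufFind : Nat → List Int → Int → Int × List Int
  | 0, parent, x => (pg parent x, parent)
  | fuel+1, parent, x =>
    if pg parent x ≠ x then
      let r := ufFind fuel parent (pg parent x)
      let parent' := PySem.List.pySetD r.2 x r.1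
      (pg parent' x, parent')
    else (pg parent x, parent)

-- UnionFind.union (by rank); returns (merged?, parent, rank)
def ufUnion (fuel : Nat) (parent rank : List Int) (x y : Int) : Bool × List Int × List Int :=
  let fx := ufFind fuel parent x
  let fy := ufFind fuel fx.2 y
  if fx.1 = fy.1 then (false, fy.2, rank)
  else if pg rank fx.1 < pg rank fy.1 then (true, PySem.List.pySetD fy.2 fx.1 fy.1, rank)
  else if pg rank fx.1 > pg rank fy.1 then (true, PySem.List.pySetD fy.2 fy.1 fx.1, rank)
  else (true, PySem.List.pySetD fy.2 fy.1 fx.1, PySem.List.pySetD rank fx.1 (pg rank fx.1 + 1))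

-- the for-loop of kruskal_mst (with its break)
def kruskalGo (fuel : Nat) (vertices : Int) :
    List (Int × Int × Int) → List Int → List Int → List (Int × Int × Int) → Int →
    Int × List (Int × Int × Int)
  | [], _, _, mst, total => (total, mst)
  | (u, v, w) :: rest, parent, rank, mst, total =>
    let res := ufUnion fuel parent rank u v
    if res.1 then
      let mst' := mst ++ [(u, v, w)]
      let total' := total + w
      if (mst'.length : Int) = vertices - 1 then (total', mst')
      else kruskalGo fuel vertices rest res.2.1 res.2.2 mst' total'
    else kruskalGo fuel vertices rest res.2.1 res.2.2 mst total

def kruskal_mst (vertices : Int) (edges : List (Int × Int × Int)) : Int × List (Int × Int × Int) :=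
  let sortedEdges := PySem.List.sorted edges (fun e => e.2.2) false
  let parent := PySem.List.pyRange 0 vertices 1          -- list(range(n))
  let rank := PySem.List.pyRepeat [0] vertices           -- [0] * n
  kruskalGo (vertices.toNat + 1) vertices sortedEdges parent rank [] 0

-- the nested edge-building loops of A
def buildEdgesA (points : List (List Int)) (n : Int) : List (Int × Int × Int) :=
  (PySem.List.pyRange 0 n 1).foldl (fun acc i =>
    (PySem.List.pyRange (i + 1) n 1).foldl (fun acc2 j =>
      acc2 ++ [(i, j, manh points i j)]) acc) []

def min_cost_connecting_points (points : List (List Int)) : Int :=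
  if (points.length : Int) ≤ 1 then 0
  else
    let n : Int := points.length
    let edges := buildEdgesA points n
    (kruskal_mst n edges).1

-- ===== PORT B =====
-- B's edge comprehension
def buildEdgesB (points : List (List Int)) (n : Int) : List (Int × Int × Int) :=
  (PySem.List.pyRange 0 n 1).flatMap (fun i =>
    (PySem.List.pyRange (i + 1) n 1).map (fun j => (i, j, manh points i j)))

-- B's for-loop over the sorted edges: comp labels, total, merge counter
def altGo (nm1 : Int) : List (Int × Int × Int) → List Int → Int → Int → Int
  | [], _, total, _ => total
  | (i, j, d) :: rest, comp, total, merged =>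
    let ci := pg comp i
    let cj := pg comp j
    if ci ≠ cj then
      let comp' := comp.map (fun c => if c = cj then ci else c)
      let total' := total + d
      let merged' := merged + 1
      if merged' = nm1 then total'
      else altGo nm1 rest comp' total' merged'
    else altGo nm1 rest comp total merged

def min_cost_connecting_points_alt (points : List (List Int)) : Int :=
  let n : Int := points.length
  if n ≤ 1 then 0
  else
    altGo (n - 1)
      (PySem.List.sorted (buildEdgesB points n) (fun e => e.2.2) false)
      (PySem.List.pyRange 0 n 1) 0 0

-- ===== PRECONDITION & SPEC =====
-- Pre_ excludes exactly the inputs where A raises IndexError: two or more points and some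
-- point with fewer than two coordinates (points[i][1] fails); B raises there too.
def Pre_min_cost_connecting_points (points : List (List Int)) : Prop :=
  1 < points.length → ∀ p ∈ points, 2 ≤ p.length
instance (points : List (List Int)) : Decidable (Pre_min_cost_connecting_points points) := by
  unfold Pre_min_cost_connecting_points; infer_instance

def pvWitness_min_cost_connecting_points : List (List Int) := [[0, 0], [1, 2], [3, -1]]

def Spec_min_cost_connecting_points (points : List (List Int)) (out : Int) : Prop := out = min_cost_connecting_points_alt points
instance (points : List (List Int)) (out : Int) : Decidable (Spec_min_cost_connecting_points points out) := by unfold Spec_min_cost_connecting_points; infer_instance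

-- ===== CLAIM (what is proved, stated in full; the proofs are below) =====
def Claim_equal_min_cost_connecting_points : Prop := ∀ (points : List (List Int)), Dom_min_cost_connecting_points points → Pre_min_cost_connecting_points points → Spec_min_cost_connecting_points points (min_cost_connecting_points points)

-- ===== LEMMAS AND PROOFS =====

def pvRootF : Nat → List Int → Int → Int
  | 0, _, x => x
  | fuel+1, p, x => if pg p x = x then x else pvRootF fuel p (pg p x)
def pvV (n : Nat) (p r : List Int) : Prop :=
  ∀ x : Int, 0 ≤ x → x < (n : Int) →
    0 ≤ pg p x ∧ pg p x < (n : Int) ∧ (pg p x ≠ x → pg r x < pg r (pg p x))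
def pvMu (r : List Int) (n : Nat) (x : Int) : Nat :=
  ((Finset.range n).filter (fun y : Nat => pg r x < pg r (((y : Int))))).card

theorem pvMu_lt {r : List Int} {n : Nat} {x y : Int} (hy0 : 0 ≤ y) (hyn : y < (n : Int))
    (h : pg r x < pg r y) : pvMu r n y < pvMu r n x := by
  apply Finset.card_lt_card
  constructor
  · intro z hz
    simp only [Finset.mem_filter, Finset.mem_range] at *
    exact ⟨hz.1, lt_trans h hz.2⟩
  · intro hsub
    have hy : y.toNat ∈ (Finset.range n).filter (fun z : Nat => pg r x < pg r ((z : Int))) := by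
      simp only [Finset.mem_filter, Finset.mem_range]
      constructor
      · omega
      · have : ((y.toNat : Int)) = y := by omega
        rw [this]; exact h
    have := hsub hy
    simp only [Finset.mem_filter, Finset.mem_range] at this
    have hyy : ((y.toNat : Int)) = y := by omega
    rw [hyy] at this
    omega

theorem pvMu_lt_n {r : List Int} {n : Nat} {x : Int} (hx0 : 0 ≤ x) (hxn : x < (n : Int)) :
    pvMu r n x < n := by
  have h : ((Finset.range n).filter (fun y : Nat => pg r x < pg r (((y : Int))))) ⊂ Finset.range n := by
    constructor
    · exact Finset.filter_subset _ _
    · intro hsub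
      have hx : x.toNat ∈ Finset.range n := by simp; omega
      have := Finset.mem_filter.mp (hsub hx)
      have hxx : ((x.toNat : Int)) = x := by omega
      rw [hxx] at this
      omega
  calc pvMu r n x < (Finset.range n).card := Finset.card_lt_card h
    _ = n := Finset.card_range n

theorem pvRootF_of_fix {p : List Int} {y : Int} (h : pg p y = y) :
    ∀ fuel, pvRootF fuel p y = y := by
  intro fuel; cases fuel <;> simp [pvRootF, h]

theorem pvRootF_spec {n : Nat} {p r : List Int} (hV : pvV n p r) :
    ∀ fuel (x : Int), 0 ≤ x → x < (n : Int) → pvMu r n x < fuel →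
      pg p (pvRootF fuel p x) = pvRootF fuel p x ∧
      0 ≤ pvRootF fuel p x ∧ pvRootF fuel p x < (n : Int) ∧
      pg r x ≤ pg r (pvRootF fuel p x) ∧
      (pg p x ≠ x → pg r x < pg r (pvRootF fuel p x)) ∧
      (∀ fuel', pvMu r n x < fuel' → pvRootF fuel' p x = pvRootF fuel p x) := by
  intro fuel
  induction fuel with
  | zero => intro x _ _ hmu; omega
  | succ fuel ih =>
    intro x hx0 hxn hmu
    by_cases hfix : pg p x = x
    · refine ⟨?_, ?_, ?_, ?_, ?_, ?_⟩ <;>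
        simp [pvRootF, hfix, pvRootF_of_fix hfix] <;> omega
    · obtain ⟨hq0, hqn, hrlt⟩ := hV x hx0 hxn
      have hrlt := hrlt hfix
      have hmu' : pvMu r n (pg p x) < fuel := by
        have := pvMu_lt hq0 hqn hrlt
        omega
      obtain ⟨i1, i2, i3, i4, i5, i6⟩ := ih (pg p x) hq0 hqn hmu'
      have hstep : pvRootF (fuel+1) p x = pvRootF fuel p (pg p x) := by
        simp [pvRootF, hfix]
      refine ⟨?_, ?_, ?_, ?_, ?_, ?_⟩
      · rw [hstep]; exact i1
      · rw [hstep]; exact i2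
      · rw [hstep]; exact i3
      · rw [hstep]; omega
      · intro _; rw [hstep]; omega
      · intro fuel' hmu''
        match fuel', hmu'' with
        | fuel'+1, hmu'' =>
          have : pvRootF (fuel'+1) p x = pvRootF fuel' p (pg p x) := by
            simp [pvRootF, hfix]
          rw [this, hstep]
          exact i6 fuel' (by have := pvMu_lt hq0 hqn hrlt; omega)

def pvRoot (n : Nat) (p : List Int) (x : Int) : Int := pvRootF n p x

theorem pvRoot_spec {n : Nat} {p r : List Int} (hV : pvV n p r) {x : Int}
    (hx0 : 0 ≤ x) (hxn : x < (n : Int)) :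
    pg p (pvRoot n p x) = pvRoot n p x ∧
    0 ≤ pvRoot n p x ∧ pvRoot n p x < (n : Int) ∧
    pg r x ≤ pg r (pvRoot n p x) ∧
    (pg p x ≠ x → pg r x < pg r (pvRoot n p x)) := by
  obtain ⟨h1, h2, h3, h4, h5, _⟩ := pvRootF_spec hV n x hx0 hxn (pvMu_lt_n hx0 hxn)
  exact ⟨h1, h2, h3, h4, h5⟩

theorem pvRoot_of_fix {n : Nat} {p : List Int} {x : Int} (h : pg p x = x) :
    pvRoot n p x = x := pvRootF_of_fix h n

theorem pvRoot_step {n : Nat} {p r : List Int} (hV : pvV n p r) {x : Int}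
    (hx0 : 0 ≤ x) (hxn : x < (n : Int)) (hne : pg p x ≠ x) :
    pvRoot n p x = pvRoot n p (pg p x) := by
  obtain ⟨hq0, hqn, hrlt⟩ := hV x hx0 hxn
  have hrlt := hrlt hne
  have hmux := pvMu_lt_n (r := r) hx0 hxn
  have hmuq := pvMu_lt hq0 hqn hrlt
  obtain ⟨_, _, _, _, _, hinv⟩ := pvRootF_spec hV n x hx0 hxn hmux
  obtain ⟨_, _, _, _, _, hinvq⟩ := pvRootF_spec hV n (pg p x) hq0 hqn (by omega)
  have e1 : pvRootF (pvMu r n x + 1) p x = pvRootF n p x := hinv _ (by omega)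
  have e2 : pvRootF (pvMu r n x + 1) p x = pvRootF (pvMu r n x) p (pg p x) := by
    simp [pvRootF, hne]
  have e3 : pvRootF (pvMu r n x) p (pg p x) = pvRootF n p (pg p x) := by
    rw [hinvq _ (by omega), hinvq _ (by omega)]
  unfold pvRoot
  rw [← e1, e2, e3]

-- from pg_set scratch (s1): paste
theorem pg_set {l : List Int} {i j : Int} (v : Int) (hi0 : 0 ≤ i)
    (hj0 : 0 ≤ j) (hjl : j < (l.length : Int)) :
    pg (PySem.List.pySetD l i v) j = if j = i then v else pg l j := by
  unfold pg
  rw [PySem.List.pySetD_of_nonneg _ _ hi0]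
  rw [PySem.List.pyGetD_eq_getElem _ _ hj0 (by simp; omega)]
  rw [List.getElem_set]
  rw [PySem.List.pyGetD_eq_getElem _ _ hj0 hjl]
  by_cases h : j = i
  · simp [h]
  · have h2 : i.toNat ≠ j.toNat := by omega
    simp [h, h2]

-- path compression: pointing x at its root preserves validity and all roots
theorem compress_spec {n : Nat} {p r : List Int} (hl : p.length = n) (hV : pvV n p r)
    {x : Int} (hx0 : 0 ≤ x) (hxn : x < (n : Int)) :
    (PySem.List.pySetD p x (pvRoot n p x)).length = n ∧
    pvV n (PySem.List.pySetD p x (pvRoot n p x)) r ∧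
    ∀ z, 0 ≤ z → z < (n : Int) →
      pvRoot n (PySem.List.pySetD p x (pvRoot n p x)) z = pvRoot n p z := by
  set rt := pvRoot n p x with hrt
  set p' := PySem.List.pySetD p x rt with hp'
  obtain ⟨hfixr, hrt0, hrtn, _, hstrict⟩ := pvRoot_spec hV hx0 hxn
  have hget : ∀ z, 0 ≤ z → z < (n : Int) → pg p' z = if z = x then rt else pg p z := by
    intro z hz0 hzn
    exact pg_set rt hx0 hz0 (by omega)
  have hlen : p'.length = n := by rw [hp', PySem.List.length_pySetD, hl]
  have hV' : pvV n p' r := by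
    intro z hz0 hzn
    rw [hget z hz0 hzn]
    by_cases hzx : z = x
    · subst hzx
      rw [if_pos rfl]
      refine ⟨hrt0, hrtn, ?_⟩
      intro hne
      by_cases hfx : pg p z = z
      · exact absurd (pvRoot_of_fix hfx) hne
      · exact hstrict hfx
    · simp only [if_neg hzx]
      exact hV z hz0 hzn
  refine ⟨hlen, hV', ?_⟩
  have main : ∀ fuel z, 0 ≤ z → z < (n : Int) → pvMu r n z < fuel →
      pvRootF fuel p' z = pvRoot n p z := by
    intro fuel
    induction fuel with
    | zero => intro z _ _ h; omega
    | succ fuel ih =>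
      intro z hz0 hzn hmu
      by_cases hzx : z = x
      · subst hzx
        have hq : pg p' z = rt := by rw [hget z hz0 hzn]; simp
        by_cases hrtz : rt = z
        · have : pg p' z = z := by rw [hq, hrtz]
          rw [pvRootF_of_fix this]
          exact hrtz.symm.trans hrt
        · have hstep : pvRootF (fuel+1) p' z = pvRootF fuel p' rt := by
            simp [pvRootF, hq, hrtz]
          have hfix' : pg p' rt = rt := by
            rw [hget rt hrt0 hrtn, if_neg hrtz]
            exact hfixr
          rw [hstep, pvRootF_of_fix hfix']
      · have hq : pg p' z = pg p z := by rw [hget z hz0 hzn]; simp [hzx]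
        by_cases hfz : pg p z = z
        · have : pg p' z = z := by rw [hq, hfz]
          rw [pvRootF_of_fix this, pvRoot_of_fix hfz]
        · have hstep : pvRootF (fuel+1) p' z = pvRootF fuel p' (pg p z) := by
            simp [pvRootF, hq, hfz]
          obtain ⟨hq0, hqn, hrlt⟩ := hV z hz0 hzn
          have hrlt := hrlt hfz
          rw [hstep, ih (pg p z) hq0 hqn (by have := pvMu_lt hq0 hqn hrlt; omega)]
          exact (pvRoot_step hV hz0 hzn hfz).symm
  intro z hz0 hzn
  have := main n z hz0 hzn (pvMu_lt_n hz0 hzn)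
  rw [← this]
  rfl

-- linking root l under root w (union); rank either untouched (rank l < rank w) or bumped at w (equal ranks)
theorem link_spec {n : Nat} {p r r' : List Int} (hl : p.length = n) (hrl : r.length = n)
    (hV : pvV n p r) {l w : Int}
    (hl0 : 0 ≤ l) (hln : l < (n : Int)) (hw0 : 0 ≤ w) (hwn : w < (n : Int))
    (hfl : pg p l = l) (hfw : pg p w = w) (hlw : l ≠ w)
    (hcase : (r' = r ∧ pg r l < pg r w) ∨ (pg r l = pg r w ∧ r' = PySem.List.pySetD r w (pg r w + 1))) :
    (PySem.List.pySetD p l w).length = n ∧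
    pvV n (PySem.List.pySetD p l w) r' ∧
    ∀ z, 0 ≤ z → z < (n : Int) →
      pvRoot n (PySem.List.pySetD p l w) z = (if pvRoot n p z = l then w else pvRoot n p z) := by
  set p' := PySem.List.pySetD p l w with hp'
  have hget : ∀ z, 0 ≤ z → z < (n : Int) → pg p' z = if z = l then w else pg p z := by
    intro z hz0 hzn
    exact pg_set w hl0 hz0 (by omega)
  have hr'get : ∀ z, 0 ≤ z → z < (n : Int) → pg r' z = if z = w then pg r' w else pg r z := by
    intro z hz0 hzn
    rcases hcase with ⟨he, _⟩ | ⟨_, he⟩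
    · subst he; split <;> simp_all
    · rw [he, pg_set _ hw0 hz0 (by omega), pg_set _ hw0 hw0 (by omega)]
      simp
  have hr'w : pg r w ≤ pg r' w := by
    rcases hcase with ⟨he, _⟩ | ⟨_, he⟩
    · subst he; omega
    · rw [he, pg_set _ hw0 hw0 (by omega)]; simp
  have hr'l_lt : pg r' l < pg r' w := by
    have h1 : pg r' l = pg r l := by rw [hr'get l hl0 hln, if_neg hlw]
    rcases hcase with ⟨he, hlt⟩ | ⟨heq, he⟩
    · subst he; omega
    · rw [h1, he, pg_set _ hw0 hw0 (by omega), if_pos rfl]; omega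
  have hlen : p'.length = n := by rw [hp', PySem.List.length_pySetD, hl]
  have hV' : pvV n p' r' := by
    intro z hz0 hzn
    rw [hget z hz0 hzn]
    by_cases hzl : z = l
    · subst hzl
      rw [if_pos rfl]
      refine ⟨hw0, hwn, fun _ => ?_⟩
      exact hr'l_lt
    · rw [if_neg hzl]
      obtain ⟨h1, h2, h3⟩ := hV z hz0 hzn
      refine ⟨h1, h2, fun hne => ?_⟩
      have h3 := h3 hne
      have hz' : pg r' z = pg r z := by
        rw [hr'get z hz0 hzn, if_neg ?_]
        intro hzw
        subst hzw
        exact hne (by rw [hfw])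
      rw [hz']
      by_cases hqw : pg p z = w
      · rw [hqw] at h3 ⊢; omega
      · rw [hr'get (pg p z) h1 h2, if_neg hqw]
        exact h3
  refine ⟨hlen, hV', ?_⟩
  have main : ∀ fuel z, 0 ≤ z → z < (n : Int) → pvMu r' n z < fuel →
      pvRootF fuel p' z = (if pvRoot n p z = l then w else pvRoot n p z) := by
    intro fuel
    induction fuel with
    | zero => intro z _ _ h; omega
    | succ fuel ih =>
      intro z hz0 hzn hmu
      by_cases hzl : z = l
      · subst hzl
        have hq : pg p' z = w := by rw [hget z hz0 hzn, if_pos rfl]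
        have hstep : pvRootF (fuel+1) p' z = pvRootF fuel p' w := by
          simp [pvRootF, hq, (Ne.symm hlw : w ≠ z)]
        have hfw' : pg p' w = w := by rw [hget w hw0 hwn, if_neg (Ne.symm hlw), hfw]
        rw [hstep, pvRootF_of_fix hfw', pvRoot_of_fix hfl, if_pos rfl]
      · have hq : pg p' z = pg p z := by rw [hget z hz0 hzn, if_neg hzl]
        by_cases hfz : pg p z = z
        · have : pg p' z = z := by rw [hq, hfz]
          rw [pvRootF_of_fix this, pvRoot_of_fix hfz, if_neg hzl]
        · have hstep : pvRootF (fuel+1) p' z = pvRootF fuel p' (pg p z) := by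
            simp [pvRootF, hq, hfz]
          obtain ⟨hq0, hqn, _⟩ := hV z hz0 hzn
          obtain ⟨h1', h2', h3'⟩ := hV' z hz0 hzn
          have h3' := h3' (by rw [hq]; exact fun h => hfz h)
          have hmu' : pvMu r' n (pg p' z) < fuel := by
            have := pvMu_lt (r := r') h1' h2' h3'
            omega
          rw [hq] at hmu' h3'
          rw [hstep, ih (pg p z) hq0 hqn hmu']
          rw [pvRoot_step hV hz0 hzn hfz]
  intro z hz0 hzn
  have := main n z hz0 hzn (pvMu_lt_n hz0 hzn)
  rw [← this]
  rfl

-- UnionFind.find returns the root, keeps validity and all roots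
theorem find_spec {n : Nat} {r : List Int} :
    ∀ (fuel : Nat) (p : List Int) (x : Int), p.length = n → pvV n p r → 0 ≤ x → x < (n : Int) →
      pvMu r n x < fuel →
      (ufFind fuel p x).1 = pvRoot n p x ∧ (ufFind fuel p x).2.length = n ∧
      pvV n (ufFind fuel p x).2 r ∧
      (∀ z, 0 ≤ z → z < (n : Int) → pvRoot n (ufFind fuel p x).2 z = pvRoot n p z) := by
  intro fuel
  induction fuel with
  | zero => intro p x _ _ _ _ h; omega
  | succ fuel ih =>
    intro p x hl hV hx0 hxn hmu
    by_cases hfix : pg p x = x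
    · have : ufFind (fuel+1) p x = (pg p x, p) := by
        simp [ufFind, hfix]
      rw [this]
      refine ⟨by rw [hfix, pvRoot_of_fix hfix], hl, hV, fun z _ _ => rfl⟩
    · obtain ⟨hq0, hqn, hrlt⟩ := hV x hx0 hxn
      have hrlt := hrlt hfix
      have hmu' : pvMu r n (pg p x) < fuel := by
        have := pvMu_lt hq0 hqn hrlt; omega
      obtain ⟨f1, f2, f3, f4⟩ := ih p (pg p x) hl hV hq0 hqn hmu'
      have hstep : ufFind (fuel+1) p x =
          (pg (PySem.List.pySetD (ufFind fuel p (pg p x)).2 x (ufFind fuel p (pg p x)).1) x,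
           PySem.List.pySetD (ufFind fuel p (pg p x)).2 x (ufFind fuel p (pg p x)).1) := by
        simp [ufFind, hfix]
      have hroot : (ufFind fuel p (pg p x)).1 = pvRoot n (ufFind fuel p (pg p x)).2 x := by
        rw [f1, ← pvRoot_step hV hx0 hxn hfix, ← f4 x hx0 hxn]
      obtain ⟨c1, c2, c3⟩ := compress_spec f2 f3 hx0 hxn (r := r)
      rw [hroot] at hstep
      have hgx : pg (PySem.List.pySetD (ufFind fuel p (pg p x)).2 x
          (pvRoot n (ufFind fuel p (pg p x)).2 x)) x =
          pvRoot n (ufFind fuel p (pg p x)).2 x := by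
        rw [pg_set _ hx0 hx0 (by rw [f2]; omega), if_pos rfl]
      rw [hstep]
      refine ⟨?_, c1, c2, ?_⟩
      · rw [hgx, ← hroot, f1, pvRoot_step hV hx0 hxn hfix]
      · intro z hz0 hzn
        rw [c3 z hz0 hzn, f4 z hz0 hzn]

-- one merge step of two roots as seen on partitions
theorem merge_iff {a b c d l w : Int}
    (hset : (l = c ∧ w = d) ∨ (l = d ∧ w = c)) :
    ((if a = l then w else a) = (if b = l then w else b)) ↔
      (a = b ∨ ((a = c ∨ a = d) ∧ (b = c ∨ b = d))) := by
  rcases hset with ⟨hc, hd⟩ | ⟨hc, hd⟩ <;> subst hc <;> subst hd <;>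
    by_cases h1 : a = l <;> by_cases h2 : b = l <;> simp [h1, h2] <;> omega

-- UnionFind.union: merge decision, validity, and the effect on the partition
theorem union_spec {n : Nat} {p r : List Int} (hl : p.length = n) (hrl : r.length = n)
    (hV : pvV n p r) {x y : Int} (hx0 : 0 ≤ x) (hxn : x < (n : Int)) (hy0 : 0 ≤ y)
    (hyn : y < (n : Int)) (fuel : Nat) (hfuel : n ≤ fuel) :
    ((ufUnion fuel p r x y).1 = true ↔ pvRoot n p x ≠ pvRoot n p y) ∧
    (ufUnion fuel p r x y).2.1.length = n ∧ (ufUnion fuel p r x y).2.2.length = n ∧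
    pvV n (ufUnion fuel p r x y).2.1 (ufUnion fuel p r x y).2.2 ∧
    ∀ z u, 0 ≤ z → z < (n : Int) → 0 ≤ u → u < (n : Int) →
      (pvRoot n (ufUnion fuel p r x y).2.1 z = pvRoot n (ufUnion fuel p r x y).2.1 u ↔
        (pvRoot n p z = pvRoot n p u ∨
          ((pvRoot n p z = pvRoot n p x ∨ pvRoot n p z = pvRoot n p y) ∧
           (pvRoot n p u = pvRoot n p x ∨ pvRoot n p u = pvRoot n p y)))) := by
  have hmux : pvMu r n x < fuel := lt_of_lt_of_le (pvMu_lt_n hx0 hxn) hfuel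
  have hmuy : pvMu r n y < fuel := lt_of_lt_of_le (pvMu_lt_n hy0 hyn) hfuel
  obtain ⟨fx1, fx2, fx3, fx4⟩ := find_spec fuel p x hl hV hx0 hxn hmux
  obtain ⟨fy1, fy2, fy3, fy4⟩ := find_spec fuel (ufFind fuel p x).2 y fx2 fx3 hy0 hyn hmuy
  have hry : (ufFind fuel (ufFind fuel p x).2 y).1 = pvRoot n p y := by
    rw [fy1, fx4 y hy0 hyn]
  have hroots2 : ∀ z, 0 ≤ z → z < (n : Int) →
      pvRoot n (ufFind fuel (ufFind fuel p x).2 y).2 z = pvRoot n p z :=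
    fun z hz0 hzn => (fy4 z hz0 hzn).trans (fx4 z hz0 hzn)
  obtain ⟨hrxfix, hrx0, hrxn, -, -⟩ := pvRoot_spec hV hx0 hxn
  obtain ⟨hryfix, hry0, hryn, -, -⟩ := pvRoot_spec hV hy0 hyn
  have hfixrx : pg (ufFind fuel (ufFind fuel p x).2 y).2 (pvRoot n p x) = pvRoot n p x := by
    have h := (pvRoot_spec fy3 hx0 hxn).1
    rwa [hroots2 x hx0 hxn] at h
  have hfixry : pg (ufFind fuel (ufFind fuel p x).2 y).2 (pvRoot n p y) = pvRoot n p y := by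
    have h := (pvRoot_spec fy3 hy0 hyn).1
    rwa [hroots2 y hy0 hyn] at h
  simp only [ufUnion]
  by_cases hc1 : (ufFind fuel p x).1 = (ufFind fuel (ufFind fuel p x).2 y).1
  · rw [if_pos hc1]
    have heq : pvRoot n p x = pvRoot n p y := by rw [← fx1, ← hry, hc1]
    refine ⟨by simp [heq], fy2, hrl, fy3, ?_⟩
    intro z u hz0 hzn hu0 hun
    rw [hroots2 z hz0 hzn, hroots2 u hu0 hun]
    constructor
    · exact fun h => Or.inl h
    · rintro (h | ⟨hz, hu⟩)
      · exact h
      · rcases hz with hz | hz <;> rcases hu with hu | hu <;> omega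
  · rw [if_neg hc1]
    have hrxry : pvRoot n p x ≠ pvRoot n p y := by rw [← fx1, ← hry]; exact hc1
    by_cases hc2 : pg r (ufFind fuel p x).1 < pg r (ufFind fuel (ufFind fuel p x).2 y).1
    · rw [if_pos hc2]
      rw [fx1, hry] at hc2 ⊢
      obtain ⟨L1, L2, L3⟩ := link_spec fy2 hrl fy3 hrx0 hrxn hry0 hryn hfixrx hfixry hrxry
        (Or.inl ⟨rfl, hc2⟩)
      refine ⟨by simp [hrxry], by rw [L1], hrl, L2, ?_⟩
      intro z u hz0 hzn hu0 hun
      rw [L3 z hz0 hzn, L3 u hu0 hun, hroots2 z hz0 hzn, hroots2 u hu0 hun]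
      exact merge_iff (Or.inl ⟨rfl, rfl⟩)
    · rw [if_neg hc2]
      by_cases hc3 : pg r (ufFind fuel p x).1 > pg r (ufFind fuel (ufFind fuel p x).2 y).1
      · rw [if_pos hc3]
        rw [fx1, hry] at hc3 ⊢
        obtain ⟨L1, L2, L3⟩ := link_spec fy2 hrl fy3 hry0 hryn hrx0 hrxn hfixry hfixrx
          (Ne.symm hrxry) (Or.inl ⟨rfl, hc3⟩)
        refine ⟨by simp [hrxry], by rw [L1], hrl, L2, ?_⟩
        intro z u hz0 hzn hu0 hun
        rw [L3 z hz0 hzn, L3 u hu0 hun, hroots2 z hz0 hzn, hroots2 u hu0 hun]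
        exact merge_iff (Or.inr ⟨rfl, rfl⟩)
      · rw [if_neg hc3]
        rw [fx1, hry] at hc2 hc3 ⊢
        have heqr : pg r (pvRoot n p y) = pg r (pvRoot n p x) := by omega
        obtain ⟨L1, L2, L3⟩ := link_spec fy2 hrl fy3 hry0 hryn hrx0 hrxn hfixry hfixrx
          (Ne.symm hrxry) (Or.inr ⟨heqr, rfl⟩)
        refine ⟨by simp [hrxry], by rw [L1], by rw [PySem.List.length_pySetD, hrl], L2, ?_⟩
        intro z u hz0 hzn hu0 hun
        rw [L3 z hz0 hzn, L3 u hu0 hun, hroots2 z hz0 hzn, hroots2 u hu0 hun]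
        exact merge_iff (Or.inr ⟨rfl, rfl⟩)

-- reading B's relabelled component array
theorem pg_map_merge {comp : List Int} {ci cj z : Int} (hz0 : 0 ≤ z)
    (hzl : z < (comp.length : Int)) :
    pg (comp.map fun c => if c = cj then ci else c) z =
      if pg comp z = cj then ci else pg comp z := by
  unfold pg
  rw [PySem.List.pyGetD_eq_getElem _ _ hz0 (by simp; omega), List.getElem_map,
      PySem.List.pyGetD_eq_getElem _ _ hz0 hzl]

-- the two loops agree step by step: union-find partition ↔ label partition
theorem sim {n : Nat} :
    ∀ (es : List (Int × Int × Int)) (p r comp : List Int) (mst : List (Int × Int × Int))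
      (total : Int),
      p.length = n → r.length = n → comp.length = n → pvV n p r →
      (∀ z u : Int, 0 ≤ z → z < (n : Int) → 0 ≤ u → u < (n : Int) →
        (pvRoot n p z = pvRoot n p u ↔ pg comp z = pg comp u)) →
      (∀ e ∈ es, 0 ≤ e.1 ∧ e.1 < (n : Int) ∧ 0 ≤ e.2.1 ∧ e.2.1 < (n : Int)) →
      (kruskalGo (n+1) (n : Int) es p r mst total).1 =
        altGo ((n : Int) - 1) es comp total (mst.length : Int) := by
  intro es
  induction es with
  | nil =>
    intro p r comp mst total _ _ _ _ _ _
    simp [kruskalGo, altGo]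
  | cons e rest ih =>
    obtain ⟨i, j, w⟩ := e
    intro p r comp mst total hpl hrl hcl hV hInv hes
    obtain ⟨hi0, hin, hj0, hjn⟩ := hes (i, j, w) (List.mem_cons_self)
    have hes' : ∀ e ∈ rest, 0 ≤ e.1 ∧ e.1 < (n : Int) ∧ 0 ≤ e.2.1 ∧ e.2.1 < (n : Int) :=
      fun e he => hes e (List.mem_cons_of_mem _ he)
    obtain ⟨U1, U2, U3, U4, U5⟩ := union_spec hpl hrl hV hi0 hin hj0 hjn (n+1) (by omega)
    dsimp only at hi0 hin hj0 hjn U1 U2 U3 U4 U5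
    have hdec : (ufUnion (n+1) p r i j).1 = true ↔ pg comp i ≠ pg comp j := by
      rw [U1, not_iff_not]
      exact hInv i j hi0 hin hj0 hjn
    simp only [kruskalGo, altGo]
    by_cases hb : (ufUnion (n+1) p r i j).1 = true
    · have hcij : pg comp i ≠ pg comp j := hdec.mp hb
      rw [if_pos hb, if_pos hcij]
      have hlen : (((mst ++ [(i, j, w)]).length : Nat) : Int) = (mst.length : Int) + 1 := by
        simp
      by_cases hbrk : ((mst ++ [(i, j, w)]).length : Int) = (n : Int) - 1
      · rw [if_pos hbrk, if_pos (by omega : (mst.length : Int) + 1 = (n : Int) - 1)]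
      · rw [if_neg hbrk, if_neg (by omega : ¬ ((mst.length : Int) + 1 = (n : Int) - 1))]
        have hroots : pvRoot n p i ≠ pvRoot n p j := U1.mp hb
        have hInv' : ∀ z u : Int, 0 ≤ z → z < (n : Int) → 0 ≤ u → u < (n : Int) →
            (pvRoot n (ufUnion (n+1) p r i j).2.1 z = pvRoot n (ufUnion (n+1) p r i j).2.1 u ↔
              pg (comp.map fun c => if c = pg comp j then pg comp i else c) z =
              pg (comp.map fun c => if c = pg comp j then pg comp i else c) u) := by
          intro z u hz0 hzn hu0 hun
          rw [U5 z u hz0 hzn hu0 hun,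
              pg_map_merge hz0 (by omega), pg_map_merge hu0 (by omega),
              merge_iff (a := pg comp z) (b := pg comp u) (Or.inr ⟨rfl, rfl⟩)]
          simp only [hInv z u hz0 hzn hu0 hun, hInv z i hz0 hzn hi0 hin,
            hInv z j hz0 hzn hj0 hjn, hInv u i hu0 hun hi0 hin, hInv u j hu0 hun hj0 hjn]
        have := ih (ufUnion (n+1) p r i j).2.1 (ufUnion (n+1) p r i j).2.2
          (comp.map fun c => if c = pg comp j then pg comp i else c)
          (mst ++ [(i, j, w)]) (total + w) U2 U3 (by simp [hcl]) U4 hInv' hes'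
        rw [this, hlen]
    · have hcij : ¬ pg comp i ≠ pg comp j := fun h => hb (hdec.mpr h)
      rw [if_neg hb, if_neg hcij]
      have heqr : pvRoot n p i = pvRoot n p j := by
        by_contra hne
        exact hb (U1.mpr hne)
      have hInv' : ∀ z u : Int, 0 ≤ z → z < (n : Int) → 0 ≤ u → u < (n : Int) →
          (pvRoot n (ufUnion (n+1) p r i j).2.1 z = pvRoot n (ufUnion (n+1) p r i j).2.1 u ↔
            pg comp z = pg comp u) := by
        intro z u hz0 hzn hu0 hun
        rw [U5 z u hz0 hzn hu0 hun, ← hInv z u hz0 hzn hu0 hun]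
        constructor
        · rintro (h | ⟨hz, hu⟩)
          · exact h
          · rw [heqr] at hz hu
            rcases hz with hz | hz <;> rcases hu with hu | hu <;> omega
        · exact fun h => Or.inl h
      exact ih (ufUnion (n+1) p r i j).2.1 (ufUnion (n+1) p r i j).2.2 comp mst total
        U2 U3 hcl U4 hInv' hes'

-- A's nested append loops build exactly B's comprehension
theorem edges_eq (points : List (List Int)) (n : Int) :
    buildEdgesA points n = buildEdgesB points n := by
  unfold buildEdgesA buildEdgesB
  simp only [PySem.List.foldl_append_singleton_eq_map]
  rw [PySem.List.foldl_append_eq_flatMap]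
  simp

-- every generated edge has in-range endpoints
theorem edges_bounds {points : List (List Int)} {n : Nat} (e : Int × Int × Int)
    (he : e ∈ PySem.List.sorted (buildEdgesB points (n : Int)) (fun e => e.2.2) false) :
    0 ≤ e.1 ∧ e.1 < (n : Int) ∧ 0 ≤ e.2.1 ∧ e.2.1 < (n : Int) := by
  rw [PySem.List.mem_sorted] at he
  unfold buildEdgesB at he
  simp only [List.mem_flatMap, List.mem_map] at he
  obtain ⟨i, hi, j, hj, rfl⟩ := he
  rw [PySem.List.mem_pyRange_one] at hi hj
  dsimp only
  exact ⟨by omega, by omega, by omega, by omega⟩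

theorem pg_range {n : Nat} {z : Int} (h0 : 0 ≤ z) (hn : z < (n : Int)) :
    pg (PySem.List.pyRange 0 (n : Int) 1) z = z := by
  unfold pg
  rw [PySem.List.pyGetD_eq_getElem _ _ h0 (by rw [PySem.List.length_pyRange_one]; omega)]
  rw [PySem.List.getElem_pyRange_one]
  omega

-- ===== VERDICT (by name: the statement is the Claim_ definition above) =====
theorem min_cost_connecting_points_spec : Claim_equal_min_cost_connecting_points := by
  unfold Claim_equal_min_cost_connecting_points
  intro points _ _
  unfold Spec_min_cost_connecting_points min_cost_connecting_points min_cost_connecting_points_alt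
  by_cases hle : ((points.length : Int) ≤ 1)
  · rw [if_pos hle, if_pos hle]
  · rw [if_neg hle, if_neg hle]
    unfold kruskal_mst
    dsimp only
    rw [edges_eq]
    have htn : ((points.length : Int)).toNat = points.length := Int.toNat_natCast _
    rw [htn]
    have hV0 : pvV points.length (PySem.List.pyRange 0 (points.length : Int) 1)
        (PySem.List.pyRepeat [0] (points.length : Int)) := by
      intro x hx0 hxn
      rw [pg_range hx0 hxn]
      exact ⟨hx0, hxn, fun hne => absurd rfl hne⟩
    have hInv0 : ∀ z u : Int, 0 ≤ z → z < (points.length : Int) → 0 ≤ u →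
        u < (points.length : Int) →
        (pvRoot points.length (PySem.List.pyRange 0 (points.length : Int) 1) z =
            pvRoot points.length (PySem.List.pyRange 0 (points.length : Int) 1) u ↔
          pg (PySem.List.pyRange 0 (points.length : Int) 1) z =
            pg (PySem.List.pyRange 0 (points.length : Int) 1) u) := by
      intro z u hz0 hzn hu0 hun
      rw [pvRoot_of_fix (pg_range hz0 hzn), pvRoot_of_fix (pg_range hu0 hun),
          pg_range hz0 hzn, pg_range hu0 hun]
    have hs := sim (n := points.length)
      (PySem.List.sorted (buildEdgesB points (points.length : Int)) (fun e => e.2.2) false)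
      (PySem.List.pyRange 0 (points.length : Int) 1)
      (PySem.List.pyRepeat [0] (points.length : Int))
      (PySem.List.pyRange 0 (points.length : Int) 1) [] 0
      (by rw [PySem.List.length_pyRange_one]; omega)
      (by rw [PySem.List.pyRepeat_singleton, List.length_replicate]; omega)
      (by rw [PySem.List.length_pyRange_one]; omega)
      hV0 hInv0 (fun e he => edges_bounds e he)
    simpa using hs
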